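-- pv_equiv track=rewrite | github.com/doobneek1/ext | locations_pipeline.py | build_entry_order
-- ===== SOURCE A (Python) =====
-- def build_entry_order(entries, priority_ids, pending_patch_ids):
--     uuids = list(entries)
--     if not priority_ids and not pending_patch_ids:
--         return uuids
--     priority_set = set(priority_ids or [])
--     pending_set = set(pending_patch_ids or [])
--     pending_priority = [uuid for uuid in uuids if uuid in pending_set and uuid in priority_set]
--     pending_other = [uuid for uuid in uuids if uuid in pending_set and uuid not in priority_set]
--     priority_other = [uuid for uuid in uuids if uuid not in pending_set and uuid in priority_set]
--     remaining = [uuid for uuid in uuids if uuid not in pending_set and uuid not in priority_set]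
--     return pending_priority + pending_other + priority_other + remaining
-- ===== SOURCE B (Python) =====
-- def build_entry_order(entries, priority_ids, pending_patch_ids):
--     priority_set = set(priority_ids or [])
--     pending_set = set(pending_patch_ids or [])
--
--     def rank(uuid):
--         if uuid in pending_set:
--             return 0 if uuid in priority_set else 1
--         return 2 if uuid in priority_set else 3
--
--     return sorted(entries, key=rank)
-- ===== Notes on version B (the rewrite author's own statement) =====
-- stated objective: simpler
-- what changed: Replaces the early return plus four filtered passes and concatenation by a rank function (0=pending&priority, 1=pending, 2=priority, 3=neither) and a single stable sort of the entries by that rank.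
import Mathlib
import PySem

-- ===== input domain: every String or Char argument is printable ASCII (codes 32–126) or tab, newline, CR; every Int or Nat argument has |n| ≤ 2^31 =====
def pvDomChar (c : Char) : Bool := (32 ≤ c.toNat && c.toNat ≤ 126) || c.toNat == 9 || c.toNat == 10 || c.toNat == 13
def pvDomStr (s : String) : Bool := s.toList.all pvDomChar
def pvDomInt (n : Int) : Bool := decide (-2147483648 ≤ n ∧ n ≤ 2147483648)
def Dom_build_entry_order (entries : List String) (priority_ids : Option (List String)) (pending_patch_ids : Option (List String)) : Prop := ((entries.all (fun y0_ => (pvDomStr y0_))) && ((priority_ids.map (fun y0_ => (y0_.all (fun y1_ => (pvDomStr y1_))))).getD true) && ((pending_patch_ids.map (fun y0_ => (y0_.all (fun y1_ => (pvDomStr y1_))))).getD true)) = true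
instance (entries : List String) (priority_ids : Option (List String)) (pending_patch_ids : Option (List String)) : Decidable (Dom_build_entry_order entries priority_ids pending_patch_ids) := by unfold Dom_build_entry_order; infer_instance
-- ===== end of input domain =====

-- B replaces A's early return plus four filtered passes and concatenation by one stable sort
-- of the entries under a 0/1/2/3 rank key (simpler: one traversal shape, shorter code).

-- ===== PORT A =====
def build_entry_order (entries : List String) (priority_ids : Option (List String)) (pending_patch_ids : Option (List String)) : List String :=
  let uuids := entries
  if (priority_ids.getD []) = [] ∧ (pending_patch_ids.getD []) = [] then uuids
  else
    let priority_set := PySem.Set.ofList (priority_ids.getD [])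
    let pending_set := PySem.Set.ofList (pending_patch_ids.getD [])
    let pending_priority := uuids.filter (fun uuid => pending_set.contains uuid && priority_set.contains uuid)
    let pending_other := uuids.filter (fun uuid => pending_set.contains uuid && !priority_set.contains uuid)
    let priority_other := uuids.filter (fun uuid => !pending_set.contains uuid && priority_set.contains uuid)
    let remaining := uuids.filter (fun uuid => !pending_set.contains uuid && !priority_set.contains uuid)
    pending_priority ++ pending_other ++ priority_other ++ remaining

-- ===== PORT B =====
-- rank(uuid) from Source B: 0 = pending & priority, 1 = pending only, 2 = priority only, 3 = neither
def pvRank (pending_set priority_set : List String) (uuid : String) : Int :=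
  if pending_set.contains uuid then (if priority_set.contains uuid then 0 else 1)
  else (if priority_set.contains uuid then 2 else 3)

def build_entry_order_alt (entries : List String) (priority_ids : Option (List String)) (pending_patch_ids : Option (List String)) : List String :=
  let priority_set := PySem.Set.ofList (priority_ids.getD [])
  let pending_set := PySem.Set.ofList (pending_patch_ids.getD [])
  PySem.List.sorted entries (pvRank pending_set priority_set) false

-- ===== PRECONDITION & SPEC =====
def Spec_build_entry_order (entries : List String) (priority_ids : Option (List String)) (pending_patch_ids : Option (List String)) (out : List String) : Prop := out = build_entry_order_alt entries priority_ids pending_patch_ids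
instance (entries : List String) (priority_ids : Option (List String)) (pending_patch_ids : Option (List String)) (out : List String) : Decidable (Spec_build_entry_order entries priority_ids pending_patch_ids out) := by unfold Spec_build_entry_order; infer_instance

-- ===== CLAIM (what is proved, stated in full; the proofs are below) =====
def Claim_equal_build_entry_order : Prop := ∀ (entries : List String) (priority_ids : Option (List String)) (pending_patch_ids : Option (List String)), Dom_build_entry_order entries priority_ids pending_patch_ids → Spec_build_entry_order entries priority_ids pending_patch_ids (build_entry_order entries priority_ids pending_patch_ids)

-- ===== LEMMAS AND PROOFS =====

-- inserting an element that comes before every element of zs puts it at the front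
lemma insertBy_cons_of_forall_before {α : Type} (before : α → α → Bool) (x : α) (zs : List α)
    (h : ∀ y ∈ zs, before x y = true) :
    PySem.List.insertBy before x zs = x :: zs := by
  cases zs with
  | nil => rfl
  | cons y ys => simp [PySem.List.insertBy, h y (by simp)]

-- inserting skips a prefix it does not come before
lemma insertBy_append_of_forall_not_before {α : Type} (before : α → α → Bool) (x : α)
    (ys zs : List α) (h : ∀ y ∈ ys, before x y = false) :
    PySem.List.insertBy before x (ys ++ zs) = ys ++ PySem.List.insertBy before x zs := by
  induction ys with
  | nil => rfl
  | cons y ys ih =>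
    simp only [List.cons_append, PySem.List.insertBy, h y (by simp)]
    simp only [Bool.false_eq_true, if_false]
    rw [ih (fun y hy => h y (by simp [hy]))]

-- the stable sort by the 0/1/2/3 rank is exactly the four filtered buckets in order
lemma sorted_rank_eq_buckets (pend prio : List String) (xs : List String) :
    PySem.List.sorted xs (pvRank pend prio) false =
      xs.filter (fun u => pend.contains u && prio.contains u) ++
      xs.filter (fun u => pend.contains u && !prio.contains u) ++
      xs.filter (fun u => !pend.contains u && prio.contains u) ++
      xs.filter (fun u => !pend.contains u && !prio.contains u) := by
  induction xs using List.reverseRecOn with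
  | nil => rfl
  | append_singleton xs a ih =>
    rw [PySem.List.sorted_eq_foldl_insertBy, List.foldl_append,
        ← PySem.List.sorted_eq_foldl_insertBy, ih]
    simp only [List.foldl_cons, List.foldl_nil, List.filter_append, List.filter_singleton]
    have hrank0 : ∀ u, pend.contains u = true → prio.contains u = true → pvRank pend prio u = 0 := by
      intro u h1 h2; simp only [List.contains_eq_mem, decide_eq_true_eq, decide_eq_false_iff_not] at h1 h2; simp [pvRank, h1, h2]
    have hrank1 : ∀ u, pend.contains u = true → prio.contains u = false → pvRank pend prio u = 1 := by
      intro u h1 h2; simp only [List.contains_eq_mem, decide_eq_true_eq, decide_eq_false_iff_not] at h1 h2; simp [pvRank, h1, h2]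
    have hrank2 : ∀ u, pend.contains u = false → prio.contains u = true → pvRank pend prio u = 2 := by
      intro u h1 h2; simp only [List.contains_eq_mem, decide_eq_true_eq, decide_eq_false_iff_not] at h1 h2; simp [pvRank, h1, h2]
    have hrank3 : ∀ u, pend.contains u = false → prio.contains u = false → pvRank pend prio u = 3 := by
      intro u h1 h2; simp only [List.contains_eq_mem, decide_eq_true_eq, decide_eq_false_iff_not] at h1 h2; simp [pvRank, h1, h2]
    set F0 := xs.filter (fun u => pend.contains u && prio.contains u) with hF0
    set F1 := xs.filter (fun u => pend.contains u && !prio.contains u) with hF1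
    set F2 := xs.filter (fun u => !pend.contains u && prio.contains u) with hF2
    set F3 := xs.filter (fun u => !pend.contains u && !prio.contains u) with hF3
    have m0 : ∀ y ∈ F0, pvRank pend prio y = 0 := by
      intro y hy; rw [hF0] at hy; simp only [List.mem_filter, Bool.and_eq_true] at hy
      exact hrank0 y hy.2.1 hy.2.2
    have m1 : ∀ y ∈ F1, pvRank pend prio y = 1 := by
      intro y hy; rw [hF1] at hy; simp only [List.mem_filter, Bool.and_eq_true, Bool.not_eq_eq_eq_not, Bool.not_true] at hy
      exact hrank1 y hy.2.1 hy.2.2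
    have m2 : ∀ y ∈ F2, pvRank pend prio y = 2 := by
      intro y hy; rw [hF2] at hy; simp only [List.mem_filter, Bool.and_eq_true, Bool.not_eq_eq_eq_not, Bool.not_true] at hy
      exact hrank2 y hy.2.1 hy.2.2
    have m3 : ∀ y ∈ F3, pvRank pend prio y = 3 := by
      intro y hy; rw [hF3] at hy; simp only [List.mem_filter, Bool.and_eq_true, Bool.not_eq_eq_eq_not, Bool.not_true] at hy
      exact hrank3 y hy.2.1 hy.2.2
    by_cases hp : pend.contains a = true <;> by_cases hq : prio.contains a = true
    · -- rank a = 0: a goes right after F0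
      have ha := hrank0 a hp hq
      rw [show F0 ++ F1 ++ F2 ++ F3 = F0 ++ (F1 ++ (F2 ++ F3)) by simp]
      rw [insertBy_append_of_forall_not_before _ a F0 _
          (fun y hy => by simp [ha, m0 y hy])]
      rw [insertBy_cons_of_forall_before _ a _
          (fun y hy => by
            simp only [List.mem_append] at hy
            rcases hy with hy | hy | hy
            · simp [ha, m1 y hy]
            · simp [ha, m2 y hy]
            · simp [ha, m3 y hy])]
      simp [← List.contains_eq_mem, hp, hq]
    · -- rank a = 1
      rw [Bool.not_eq_true] at hq
      have ha := hrank1 a hp hq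
      rw [show F0 ++ F1 ++ F2 ++ F3 = F0 ++ (F1 ++ (F2 ++ F3)) by simp]
      rw [insertBy_append_of_forall_not_before _ a F0 _
          (fun y hy => by simp [ha, m0 y hy])]
      rw [insertBy_append_of_forall_not_before _ a F1 _
          (fun y hy => by simp [ha, m1 y hy])]
      rw [insertBy_cons_of_forall_before _ a _
          (fun y hy => by
            simp only [List.mem_append] at hy
            rcases hy with hy | hy
            · simp [ha, m2 y hy]
            · simp [ha, m3 y hy])]
      simp [← List.contains_eq_mem, hp, hq]
    · -- rank a = 2
      rw [Bool.not_eq_true] at hp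
      have ha := hrank2 a hp hq
      rw [show F0 ++ F1 ++ F2 ++ F3 = F0 ++ (F1 ++ (F2 ++ F3)) by simp]
      rw [insertBy_append_of_forall_not_before _ a F0 _
          (fun y hy => by simp [ha, m0 y hy])]
      rw [insertBy_append_of_forall_not_before _ a F1 _
          (fun y hy => by simp [ha, m1 y hy])]
      rw [insertBy_append_of_forall_not_before _ a F2 _
          (fun y hy => by simp [ha, m2 y hy])]
      rw [insertBy_cons_of_forall_before _ a F3
          (fun y hy => by simp [ha, m3 y hy])]
      simp [← List.contains_eq_mem, hp, hq]
    · -- rank a = 3: a goes at the very end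
      rw [Bool.not_eq_true] at hp hq
      have ha := hrank3 a hp hq
      rw [PySem.List.insertBy_of_forall_not_before _ a _
          (fun y hy => by
            simp only [List.mem_append] at hy
            rcases hy with ((hy | hy) | hy) | hy
            · simp [ha, m0 y hy]
            · simp [ha, m1 y hy]
            · simp [ha, m2 y hy]
            · simp [ha, m3 y hy])]
      simp [← List.contains_eq_mem, hp, hq]

-- ===== VERDICT (by name: the statement is the Claim_ definition above) =====
theorem build_entry_order_spec : Claim_equal_build_entry_order := by
  intro entries priority_ids pending_patch_ids _
  unfold Spec_build_entry_order build_entry_order build_entry_order_alt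
  simp only []
  rw [sorted_rank_eq_buckets]
  by_cases h : (priority_ids.getD []) = [] ∧ (pending_patch_ids.getD []) = []
  · -- A's early return: both sets empty, every rank is 3, the sort keeps the order
    rw [if_pos h, h.1, h.2]
    simp [show PySem.Set.ofList ([] : List String) = [] from rfl]
  · rw [if_neg h]; rfl
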